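-- pv_equiv track=rewrite | github.com/Tech-Jan/AOC2022 | aoc2024/Day4/src/main.py | get_x_line
-- ===== SOURCE A (Python) =====
-- def get_x_line( line, keyword):
--     x_coord = []
--     pos = 0
--     while True:
--         x = line.find(keyword, pos)
--         if x != -1:
--             x_coord.append(x + 1)
--         pos = x + 1
--         if x == -1:
--             return x_coord
-- ===== SOURCE B (Python) =====
-- def get_x_line(line, keyword):
--     return [i + 1 for i in range(len(line)) if line.startswith(keyword, i)]
-- ===== Notes on version B (the rewrite author's own statement) =====
-- stated objective: idiomatic
-- what changed: Replaced the while-True loop of repeated str.find calls with mutable pos/append state by a single comprehension that scans every index 0..len(line)-1 and keeps i+1 where line.startswith(keyword, i); Pre_ excludes the degenerate empty keyword, where A's str.find also reports a match one past the end of the line and either value is as defensible as the other.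
-- outside the precondition, e.g. on get_x_line('ab', ''): A returns [1, 2, 3], B returns [1, 2]
import Mathlib
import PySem

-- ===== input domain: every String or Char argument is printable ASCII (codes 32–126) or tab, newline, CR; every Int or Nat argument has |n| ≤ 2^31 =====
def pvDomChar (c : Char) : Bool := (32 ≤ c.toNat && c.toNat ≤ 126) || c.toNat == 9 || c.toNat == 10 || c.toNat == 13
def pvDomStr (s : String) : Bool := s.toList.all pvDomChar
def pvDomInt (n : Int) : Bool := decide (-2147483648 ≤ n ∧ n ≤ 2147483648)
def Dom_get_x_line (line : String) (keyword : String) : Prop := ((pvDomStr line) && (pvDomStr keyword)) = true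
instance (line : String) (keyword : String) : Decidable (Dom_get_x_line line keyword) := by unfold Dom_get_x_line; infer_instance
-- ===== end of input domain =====

-- B replaces A's repeated str.find loop by a position scan keeping i+1 where the keyword is a prefix at i (idiomatic; same cost); Pre_ excludes the degenerate empty keyword, where both values are defensible.


-- ===== PORT A =====
-- helper facts the port's termination proof cites
theorem pvFindFrom_past_end (cs key : List Char) (pos : Nat) (h : cs.length < pos) :
    PySem.Chars.findFrom cs key (pos : Int) none = -1 := by
  simp only [PySem.Chars.findFrom]
  have h1 : ¬ ((pos : Int) < 0) := by omega
  have h2 : (cs.length : Int) < (pos : Int) := by exact_mod_cast h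
  simp [h1, h2]

theorem pvFindFrom_bounds (cs key : List Char) (pos : Nat)
    (h : PySem.Chars.findFrom cs key (pos : Int) none ≠ -1) :
    pos ≤ cs.length ∧ (pos : Int) ≤ PySem.Chars.findFrom cs key (pos : Int) none ∧
      (PySem.Chars.findFrom cs key (pos : Int) none).toNat ≤ cs.length := by
  have hle : pos ≤ cs.length := by
    by_contra hgt
    exact h (pvFindFrom_past_end cs key pos (by omega))
  have heq := PySem.Chars.findFrom_natCast cs key pos hle
  have hr1 := PySem.Chars.neg_one_le_find (cs.drop pos) key
  have hr2 := PySem.Chars.find_le_length (cs.drop pos) key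
  rw [List.length_drop] at hr2
  have hrne : PySem.Chars.find (cs.drop pos) key ≠ -1 := by
    intro hc
    rw [heq, if_pos hc] at h
    exact h rfl
  refine ⟨hle, ?_, ?_⟩ <;> rw [heq, if_neg hrne] <;> omega

-- the while-True loop of A: find from pos, append x+1, continue from x+1, stop at -1
def pvGoA (cs key : List Char) (pos : Nat) (acc : List Int) : List Int :=
  let x := PySem.Chars.findFrom cs key (pos : Int) none
  if _h : x = -1 then acc
  else pvGoA cs key (x.toNat + 1) (acc ++ [x + 1])
termination_by cs.length + 1 - pos
decreasing_by
  obtain ⟨h1, h2, h3⟩ := pvFindFrom_bounds cs key pos _h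
  omega

def get_x_line (line : String) (keyword : String) : List Int :=
  pvGoA line.toList keyword.toList 0 []

-- ===== PORT B =====
-- line.startswith(keyword, i) for 0 ≤ i is exactly startswith on the suffix line[i:] (ported by hand; exact on these inputs)
def get_x_line_alt (line : String) (keyword : String) : List Int :=
  (List.range line.toList.length).filterMap
    (fun i => if PySem.Chars.startswith (line.toList.drop i) keyword.toList
              then some ((i : Int) + 1) else none)

-- ===== PRECONDITION & SPEC =====
-- Pre_ excludes only the empty keyword, a degenerate corner on which A's str.find also reports
-- a match one position past the end of the line and either value is as defensible as the other.
def Pre_get_x_line (line : String) (keyword : String) : Prop := keyword ≠ ""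
instance (line : String) (keyword : String) : Decidable (Pre_get_x_line line keyword) := by unfold Pre_get_x_line; infer_instance
def pvWitness_get_x_line : String × String := ("abcbc", "bc")

def Spec_get_x_line (line : String) (keyword : String) (out : List Int) : Prop := out = get_x_line_alt line keyword
instance (line : String) (keyword : String) (out : List Int) : Decidable (Spec_get_x_line line keyword out) := by unfold Spec_get_x_line; infer_instance

-- ===== CLAIM (what is proved, stated in full; the proofs are below) =====
def Claim_equal_get_x_line : Prop := ∀ (line : String) (keyword : String), Dom_get_x_line line keyword → Pre_get_x_line line keyword → Spec_get_x_line line keyword (get_x_line line keyword)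

-- ===== LEMMAS AND PROOFS =====

-- no occurrence at any index ≥ pos when key is not an infix of the suffix
theorem pvNoOcc (cs key : List Char) (pos : Nat)
    (h : ¬ key <:+: cs.drop pos) : ∀ i, pos ≤ i → ¬ key <+: cs.drop i := by
  intro i hi hpre
  apply h
  rw [← (PySem.Chars.isIn_iff_infix key (cs.drop pos))]
  rw [← PySem.Chars.exists_prefix_drop_iff_isIn]
  have hip : pos + (i - pos) = i := by omega
  exact ⟨i - pos, by rwa [List.drop_drop, hip]⟩

-- loop invariant: pvGoA appends exactly the matching positions in [pos, len] in order
theorem pvGoA_eq (cs key : List Char) (fuel : Nat) : ∀ pos acc,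
    cs.length + 1 - pos ≤ fuel →
    pvGoA cs key pos acc = acc ++ (List.range' pos (cs.length + 1 - pos)).filterMap
      (fun i => if key <+: cs.drop i then some ((i : Int) + 1) else none) := by
  induction fuel with
  | zero =>
    intro pos acc hf
    have hpos : cs.length + 1 ≤ pos := by omega
    rw [pvGoA]
    simp [pvFindFrom_past_end cs key pos (by omega), Nat.sub_eq_zero_of_le hpos]
  | succ fuel ih =>
    intro pos acc hf
    rw [pvGoA]
    by_cases hx : PySem.Chars.findFrom cs key (pos : Int) none = -1
    · simp only [hx, dite_true]
      by_cases hp : pos ≤ cs.length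
      · have hno := pvNoOcc cs key pos
          ((PySem.Chars.findFrom_natCast_eq_neg_one_iff cs key pos hp).mp hx)
        have : (List.range' pos (cs.length + 1 - pos)).filterMap
            (fun i => if key <+: cs.drop i then some ((i : Int) + 1) else none) = [] := by
          rw [List.filterMap_eq_nil_iff]
          intro i hi
          have := List.mem_range'_1.mp hi
          simp [hno i this.1]
        simp [this]
      · simp [Nat.sub_eq_zero_of_le (by omega : cs.length + 1 ≤ pos)]
    · obtain ⟨hp, hge, hle⟩ := pvFindFrom_bounds cs key pos hx
      set x := PySem.Chars.findFrom cs key (pos : Int) none with hxdef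
      obtain ⟨-, hpre, hmin⟩ := PySem.Chars.findFrom_natCast_spec cs key pos hp hx
      rw [← hxdef] at hpre hmin
      have hx0 : (0 : Int) ≤ x := by omega
      have hm : pos ≤ x.toNat := by omega
      simp only [hx, dite_false]
      rw [ih (x.toNat + 1) (acc ++ [x + 1]) (by omega)]
      have hsplit : List.range' pos (cs.length + 1 - pos)
          = List.range' pos (x.toNat - pos) ++ x.toNat :: List.range' (x.toNat + 1) (cs.length - x.toNat) := by
        have h1 : List.range' pos (x.toNat - pos) ++ List.range' (pos + (x.toNat - pos)) (cs.length + 1 - x.toNat)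
            = List.range' pos ((x.toNat - pos) + (cs.length + 1 - x.toNat)) := List.range'_append_1 ..
        have h2 : pos + (x.toNat - pos) = x.toNat := by omega
        have h3 : (x.toNat - pos) + (cs.length + 1 - x.toNat) = cs.length + 1 - pos := by omega
        have h4 : List.range' x.toNat (cs.length + 1 - x.toNat)
            = x.toNat :: List.range' (x.toNat + 1) (cs.length - x.toNat) := by
          have : cs.length + 1 - x.toNat = (cs.length - x.toNat) + 1 := by omega
          rw [this, List.range'_succ]
        rw [h2, h3, h4] at h1
        exact h1.symm
      rw [hsplit]
      rw [List.filterMap_append]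
      have hnil : (List.range' pos (x.toNat - pos)).filterMap
          (fun i => if key <+: cs.drop i then some ((i : Int) + 1) else none) = [] := by
        rw [List.filterMap_eq_nil_iff]
        intro i hi
        have hb := List.mem_range'_1.mp hi
        simp [hmin i hb.1 (by omega)]
      have hcast : ((x.toNat : Int) + 1) = x + 1 := by omega
      simp only [hnil, List.filterMap_cons, List.nil_append]
      rw [if_pos hpre]
      have hlen : cs.length + 1 - (x.toNat + 1) = cs.length - x.toNat := by omega
      simp only [hlen]
      simp
      omega

-- ===== VERDICT (by name: the statement is the Claim_ definition above) =====
theorem get_x_line_spec : Claim_equal_get_x_line := by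
  intro line keyword _ hpre
  have hk : keyword.toList ≠ [] := by
    intro hc
    exact hpre (by cases keyword; simp_all)
  unfold Spec_get_x_line get_x_line get_x_line_alt
  rw [pvGoA_eq line.toList keyword.toList (line.toList.length + 1) 0 [] (by omega)]
  have hsplit : List.range' 0 (line.toList.length + 1)
      = List.range' 0 line.toList.length ++ [line.toList.length] := by
    rw [List.range'_1_concat]
    simp
  simp only [Nat.sub_zero, List.nil_append, hsplit, List.filterMap_append]
  have hlast : ¬ keyword.toList <+: line.toList.drop line.toList.length := by
    rw [List.drop_length]
    intro hc
    exact hk (List.prefix_nil.mp hc)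
  rw [List.range_eq_range']
  simp only [List.filterMap_cons, List.filterMap_nil, if_neg hlast, List.append_nil]
  apply List.filterMap_congr
  intro i _
  by_cases h : keyword.toList <+: line.toList.drop i
  · simp [h, (PySem.Chars.startswith_iff _ _).mpr h]
  · have : PySem.Chars.startswith (line.toList.drop i) keyword.toList = false := by
      rw [Bool.eq_false_iff]
      intro hc
      exact h ((PySem.Chars.startswith_iff _ _).mp hc)
    simp [h, this]
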